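-- pv_equiv track=rewrite | github.com/DynamicCodeSearch/SLACC | simple/src/main/python/Y14R5P1/Smithers/generated_py_263a1af396df4e8fa1f96950f5309feb.py | func_45760d7b68444aaf88126d15d89cfca1
-- ===== SOURCE A (Python) =====
-- def func_45760d7b68444aaf88126d15d89cfca1(s, p, r, n, q):
--     dev = [((i * p + q) % r + s) for i in range(n)]
--     tot = sum(dev)
--     i = 0
--     j = n - 1
--     ltot = 0
--     mtot = tot
--     rtot = 0
--     best = 0
--     return mtot
-- ===== SOURCE B (Python) =====
-- def func_45760d7b68444aaf88126d15d89cfca1(s, p, r, n, q):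
--     # period-splitting: i -> (i*p+q) % r is periodic with period t = |r| // gcd(|p|, |r|),
--     # so only min(n, t) terms are ever evaluated.
--     if n <= 0:
--         return 0
--     a, b = abs(p), abs(r)
--     while b:
--         a, b = b, a % b
--     t = abs(r) // a
--     full, rem = divmod(n, t)
--     m = t if full > 0 else rem
--     S = 0
--     tail = 0
--     for i in range(m):
--         v = (i * p + q) % r
--         S += v
--         if i < rem:
--             tail += v
--     return full * S + tail + n * s
-- ===== Notes on version B (the rewrite author's own statement) =====
-- stated objective: alternative
-- what changed: B exploits that i -> (i*p+q) % r is periodic with period t = |r|//gcd(|p|,|r|): it sums one period (and the partial-period prefix) over min(n, t) terms and scales, instead of A's sum over all n terms.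
import Mathlib
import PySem

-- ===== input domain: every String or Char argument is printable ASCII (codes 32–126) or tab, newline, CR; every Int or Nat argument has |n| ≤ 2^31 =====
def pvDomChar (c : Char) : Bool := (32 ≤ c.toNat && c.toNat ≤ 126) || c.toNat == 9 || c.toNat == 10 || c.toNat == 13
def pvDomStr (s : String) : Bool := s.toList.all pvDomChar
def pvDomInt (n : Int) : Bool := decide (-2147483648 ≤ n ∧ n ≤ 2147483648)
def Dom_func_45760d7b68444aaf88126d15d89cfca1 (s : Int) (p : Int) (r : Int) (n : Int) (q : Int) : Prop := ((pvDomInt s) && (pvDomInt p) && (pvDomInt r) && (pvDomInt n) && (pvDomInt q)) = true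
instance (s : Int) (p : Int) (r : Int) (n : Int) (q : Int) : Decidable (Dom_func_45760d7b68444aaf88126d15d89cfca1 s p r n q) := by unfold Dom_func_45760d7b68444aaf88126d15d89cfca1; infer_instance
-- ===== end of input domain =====

-- B replaces A's sum over all of range(n) by a period-split: i ↦ (i*p+q) % r has period
-- t = |r| // gcd(|p|, |r|), so B sums only min(n, t) terms and scales (objective: alternative).

-- ===== PORT A =====
def func_45760d7b68444aaf88126d15d89cfca1 (s : Int) (p : Int) (r : Int) (n : Int) (q : Int) : Int :=
  let dev := (PySem.List.pyRange 0 n 1).map (fun i => PySem.Int.mod (i * p + q) r + s)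
  let tot := dev.foldl (· + ·) 0
  let _i : Int := 0
  let _j : Int := n - 1
  let _ltot : Int := 0
  let mtot := tot
  let _rtot : Int := 0
  let _best : Int := 0
  mtot

-- ===== PORT B =====
-- Euclid loop of Source B: `while b: a, b = b, a % b`
def pvGcdLoop (a b : Int) : Int :=
  if _h : b = 0 then a
  else pvGcdLoop b (PySem.Int.mod a b)
termination_by b.natAbs
decreasing_by
  rcases lt_or_gt_of_ne _h with hb | hb
  . have := PySem.Int.mod_neg_bounds a hb
    omega
  . have h1 := PySem.Int.mod_nonneg a hb
    have h2 := PySem.Int.mod_lt a hb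
    omega

def func_45760d7b68444aaf88126d15d89cfca1_alt (s : Int) (p : Int) (r : Int) (n : Int) (q : Int) : Int :=
  if n <= 0 then 0
  else
    let g := pvGcdLoop |p| |r|
    let t := PySem.Int.floordiv |r| g
    let full := PySem.Int.floordiv n t
    let rem := PySem.Int.mod n t
    let m := if 0 < full then t else rem
    let st := (PySem.List.pyRange 0 m 1).foldl
      (fun (acc : Int × Int) i =>
        (acc.1 + PySem.Int.mod (i * p + q) r,
         if i < rem then acc.2 + PySem.Int.mod (i * p + q) r else acc.2)) (0, 0)
    full * st.1 + st.2 + n * s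



-- ===== PRECONDITION & SPEC =====
-- Pre_ excludes exactly the inputs (0 < n and r = 0) on which both A and B raise ZeroDivisionError.
def Pre_func_45760d7b68444aaf88126d15d89cfca1 (s : Int) (p : Int) (r : Int) (n : Int) (q : Int) : Prop := n ≤ 0 ∨ r ≠ 0
instance (s : Int) (p : Int) (r : Int) (n : Int) (q : Int) : Decidable (Pre_func_45760d7b68444aaf88126d15d89cfca1 s p r n q) := by unfold Pre_func_45760d7b68444aaf88126d15d89cfca1; infer_instance
def pvWitness_func_45760d7b68444aaf88126d15d89cfca1 : Int × Int × Int × Int × Int := (1, 2, 5, 7, 3)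

def Spec_func_45760d7b68444aaf88126d15d89cfca1 (s : Int) (p : Int) (r : Int) (n : Int) (q : Int) (out : Int) : Prop := out = func_45760d7b68444aaf88126d15d89cfca1_alt s p r n q
instance (s : Int) (p : Int) (r : Int) (n : Int) (q : Int) (out : Int) : Decidable (Spec_func_45760d7b68444aaf88126d15d89cfca1 s p r n q out) := by unfold Spec_func_45760d7b68444aaf88126d15d89cfca1; infer_instance

-- ===== CLAIM (what is proved, stated in full; the proofs are below) =====
def Claim_equal_func_45760d7b68444aaf88126d15d89cfca1 : Prop := ∀ (s : Int) (p : Int) (r : Int) (n : Int) (q : Int), Dom_func_45760d7b68444aaf88126d15d89cfca1 s p r n q → Pre_func_45760d7b68444aaf88126d15d89cfca1 s p r n q → Spec_func_45760d7b68444aaf88126d15d89cfca1 s p r n q (func_45760d7b68444aaf88126d15d89cfca1 s p r n q)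

-- ===== LEMMAS AND PROOFS =====
theorem pvModAdd (r a k : Int) (hr : r ≠ 0) :
    PySem.Int.mod (a + r * k) r = PySem.Int.mod a r := by
  rcases lt_or_gt_of_ne hr with hneg | hpos
  · have hpos' : (0:Int) < -r := by omega
    have e1 : PySem.Int.mod (a + r * k) r = - PySem.Int.mod (-(a + r * k)) (-r) := by
      have := PySem.Int.mod_neg_neg (a + r * k) r
      omega
    have e2 : PySem.Int.mod a r = - PySem.Int.mod (-a) (-r) := by
      have := PySem.Int.mod_neg_neg a r
      omega
    rw [e1, e2]
    have e3 : -(a + r * k) = -a + (-r) * k := by ring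
    rw [e3, PySem.Int.mod_eq_emod_of_pos hpos', PySem.Int.mod_eq_emod_of_pos hpos',
        Int.add_mul_emod_self_left]
  · rw [PySem.Int.mod_eq_emod_of_pos hpos, PySem.Int.mod_eq_emod_of_pos hpos,
        Int.add_mul_emod_self_left]

theorem pvWindow (F : Nat → Int) (T : Nat) (hper : ∀ c : Nat, F (c + T) = F c) :
    ∀ c : Nat, ∑ j ∈ Finset.range T, F (c + j) = ∑ j ∈ Finset.range T, F j := by
  intro c
  induction c with
  | zero => simp
  | succ c ih =>
    have h1 : ∑ j ∈ Finset.range (T+1), F (c + j) = (∑ j ∈ Finset.range T, F (c + j)) + F (c + T) :=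
      Finset.sum_range_succ _ _
    have h2 : ∑ j ∈ Finset.range (T+1), F (c + j) = (∑ j ∈ Finset.range T, F (c + (j+1))) + F (c + 0) :=
      Finset.sum_range_succ' _ _
    have h3 : ∑ j ∈ Finset.range T, F (c + (j+1)) = ∑ j ∈ Finset.range T, F ((c+1) + j) :=
      Finset.sum_congr rfl (fun j _ => by ring_nf)
    have h4 := hper c
    simp only [Nat.add_zero] at h2
    rw [h3] at h2
    omega

theorem pvBlocks (F : Nat → Int) (T : Nat) (hper : ∀ c : Nat, F (c + T) = F c) :
    ∀ (K R : Nat), ∑ i ∈ Finset.range (R + K * T), F i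
      = K * (∑ i ∈ Finset.range T, F i) + ∑ i ∈ Finset.range R, F i := by
  intro K
  induction K with
  | zero => simp
  | succ K ih =>
    intro R
    have e : R + (K+1) * T = (R + K * T) + T := by ring
    rw [e, Finset.sum_range_add, ih R, pvWindow F T hper (R + K * T)]
    push_cast
    ring
theorem pvGcdLoop_eq : ∀ (y x : Nat), pvGcdLoop (x : Int) (y : Int) = (Nat.gcd y x : Int) := by
  intro y
  induction y using Nat.strong_induction_on with
  | _ y ih =>
    intro x
    rw [pvGcdLoop]
    by_cases hy : y = 0
    · subst hy; simp
    · have hy' : ((y : Int) = 0) = False := by simp [hy]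
      rw [dif_neg (by exact_mod_cast hy)]
      rw [PySem.Int.mod_natCast]
      rw [ih (x % y) (Nat.mod_lt _ (Nat.pos_of_ne_zero hy))]
      rw [Nat.gcd_rec y x]

theorem pvFoldlPair (f : Int → Int) (rem : Int) :
    ∀ (l : List Int) (S0 T0 : Int),
      l.foldl (fun (acc : Int × Int) i =>
        (acc.1 + f i, if i < rem then acc.2 + f i else acc.2)) (S0, T0)
      = (S0 + (l.map f).sum, T0 + ((l.filter (fun i => decide (i < rem))).map f).sum) := by
  intro l
  induction l with
  | nil => simp
  | cons a l ih =>
    intro S0 T0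
    simp only [List.foldl_cons, List.map_cons, List.sum_cons, List.filter_cons]
    by_cases ha : a < rem
    · simp [ha, ih, Prod.ext_iff]
      constructor <;> ring
    · simp [ha, ih, Prod.ext_iff]
      ring

theorem pvFilterRange (rem m : Int) (h0 : 0 ≤ rem) (h1 : rem ≤ m) :
    (PySem.List.pyRange 0 m).filter (fun i => decide (i < rem)) = PySem.List.pyRange 0 rem := by
  rw [PySem.List.pyRange_one_append 0 rem m h0 h1, List.filter_append]
  have hA : (PySem.List.pyRange 0 rem).filter (fun i => decide (i < rem)) = PySem.List.pyRange 0 rem :=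
    List.filter_eq_self.mpr (fun a ha => by
      have := PySem.List.mem_pyRange_one.mp ha
      simpa using this.2)
  have hB : (PySem.List.pyRange rem m).filter (fun i => decide (i < rem)) = [] :=
    List.filter_eq_nil_iff.mpr (fun a ha => by
      have := PySem.List.mem_pyRange_one.mp ha
      simp
      omega)
  rw [hA, hB, List.append_nil]

theorem pvSumPyRange (f : Int → Int) (b : Int) :
    ((PySem.List.pyRange 0 b).map f).sum = ∑ k ∈ Finset.range b.toNat, f (k : Int) := by
  rw [PySem.List.pyRange_one, List.map_map]
  have : (b - 0).toNat = b.toNat := by simp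
  rw [this]
  induction b.toNat with
  | zero => simp
  | succ m ih => rw [List.range_succ, Finset.sum_range_succ]; simp_all

theorem pvMain (s p r n q : Int) (h : n <= 0 ∨ r ≠ 0) :
    func_45760d7b68444aaf88126d15d89cfca1 s p r n q = func_45760d7b68444aaf88126d15d89cfca1_alt s p r n q := by
  by_cases hn : n <= 0
  . simp [func_45760d7b68444aaf88126d15d89cfca1, func_45760d7b68444aaf88126d15d89cfca1_alt, hn,
      PySem.List.pyRange_one_eq_nil hn]
  . have hn' : 0 < n := by omega
    have hr : r ≠ 0 := by tauto
    have hrnat : r.natAbs ≠ 0 := by simpa using hr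
    set f : Int → Int := fun i => PySem.Int.mod (i * p + q) r with hf
    have hA : func_45760d7b68444aaf88126d15d89cfca1 s p r n q
        = (∑ k ∈ Finset.range n.toNat, f (k : Int)) + n * s := by
      show ((PySem.List.pyRange 0 n 1).map (fun i => f i + s)).foldl (· + ·) 0 = _
      rw [← List.sum_eq_foldl]
      rw [PySem.List.sum_map_add_int (PySem.List.pyRange 0 n 1) f (fun _ => s),
        PySem.List.sum_map_const_int, pvSumPyRange f n, PySem.List.length_pyRange_one]
      have hc : (((n - 0).toNat : Int)) = n := by omega
      rw [hc]
    have hgcd : pvGcdLoop |p| |r| = ((Nat.gcd r.natAbs p.natAbs : Nat) : Int) := by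
      rw [Int.abs_eq_natAbs, Int.abs_eq_natAbs]
      exact pvGcdLoop_eq r.natAbs p.natAbs
    set G := Nat.gcd r.natAbs p.natAbs with hG
    have hGpos : 0 < G := Nat.pos_of_ne_zero (fun h0 => hrnat (Nat.eq_zero_of_gcd_eq_zero_left (hG ▸ h0)))
    set T := r.natAbs / G with hT
    have hTpos : 0 < T := Nat.div_pos (Nat.le_of_dvd (Nat.pos_of_ne_zero hrnat) (Nat.gcd_dvd_left _ _)) hGpos
    have hTpos' : (0:Int) < (T : Int) := by exact_mod_cast hTpos
    have ht2 : PySem.Int.floordiv |r| ((G : Nat) : Int) = ((T : Nat) : Int) := by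
      rw [Int.abs_eq_natAbs, PySem.Int.floordiv_natCast]
    have hdvd : (r : Int) ∣ (T : Int) * p := by
      have h1 : ((G : Int)) ∣ p := by
        have h2 : ((G : Int)) ∣ ((p.natAbs : Int)) := Int.natCast_dvd_natCast.mpr (Nat.gcd_dvd_right _ _)
        exact h2.trans (Int.natAbs_dvd.mpr dvd_rfl)
      obtain ⟨d, hd⟩ := h1
      have hTG : (T : Int) * (G : Int) = ((r.natAbs : Nat) : Int) := by
        exact_mod_cast congrArg (Nat.cast (R := Int)) (Nat.div_mul_cancel (Nat.gcd_dvd_left r.natAbs p.natAbs))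
      have he : (T : Int) * p = ((r.natAbs : Nat) : Int) * d := by rw [hd, ← hTG]; ring
      rw [he]
      exact Dvd.dvd.mul_right (Int.dvd_natAbs.mpr dvd_rfl) d
    have hper : ∀ x : Int, f (x + (T : Int)) = f x := by
      intro x
      obtain ⟨c, hc⟩ := hdvd
      have he : (x + (T : Int)) * p + q = (x * p + q) + r * c := by rw [← hc]; ring
      show PySem.Int.mod ((x + (T:Int)) * p + q) r = PySem.Int.mod (x * p + q) r
      rw [he, pvModAdd r _ c hr]
    have hperN : ∀ c : Nat, f ((c + T : Nat) : Int) = f (c : Int) := by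
      intro c
      have hx := hper (c : Int)
      push_cast
      push_cast at hx
      exact hx
    have hne : ¬ n <= 0 := hn
    rw [hA]
    simp only [func_45760d7b68444aaf88126d15d89cfca1_alt, hne, if_false, hgcd, ht2]
    set full := PySem.Int.floordiv n ((T : Nat) : Int) with hfull
    set rem := PySem.Int.mod n ((T : Nat) : Int) with hrem
    have hfull0 : 0 <= full := by
      rw [hfull]
      exact (PySem.Int.le_floordiv_iff_mul_le hTpos').mpr (by omega)
    have hrem0 : 0 <= rem := PySem.Int.mod_nonneg n hTpos'
    have hremT : rem < (T : Int) := PySem.Int.mod_lt n hTpos'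
    have heqn : full * (T : Int) + rem = n := PySem.Int.floordiv_mul_add_mod n ((T : Nat) : Int)
    rcases eq_or_lt_of_le hfull0 with hfz | hfp
    . have hremn : rem = n := by
        have hTnn : (0:Int) <= (T:Int) := le_of_lt hTpos'
        nlinarith [heqn, hfz]
      rw [if_neg (by omega)]
      rw [pvFoldlPair f rem]
      rw [pvFilterRange rem rem hrem0 le_rfl]
      rw [hremn, pvSumPyRange f n, ← hfz]
      simp
    . rw [if_pos hfp]
      rw [pvFoldlPair f rem]
      rw [pvFilterRange rem ((T : Nat) : Int) hrem0 (le_of_lt hremT)]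
      rw [pvSumPyRange f ((T : Nat) : Int), pvSumPyRange f rem]
      set K := full.toNat with hK
      set R := rem.toNat with hR
      have hKc : ((K : Nat) : Int) = full := Int.toNat_of_nonneg hfull0
      have hRc : ((R : Nat) : Int) = rem := Int.toNat_of_nonneg hrem0
      have hNc : n = ((R + K * T : Nat) : Int) := by
        push_cast
        rw [hKc, hRc]
        linarith [heqn, hKc]
      have hN : n.toNat = R + K * T := by rw [hNc]; exact Int.toNat_natCast _
      rw [hN]
      rw [pvBlocks (fun k : Nat => f (k : Int)) T (fun c => hperN c) K R]
      simp only [Int.toNat_natCast]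
      rw [hKc]
      ring

-- ===== VERDICT (by name: the statement is the Claim_ definition above) =====
theorem func_45760d7b68444aaf88126d15d89cfca1_spec : Claim_equal_func_45760d7b68444aaf88126d15d89cfca1 := by
  intro s p r n q _ hpre
  unfold Spec_func_45760d7b68444aaf88126d15d89cfca1
  exact pvMain s p r n q hpre
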